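-- pv_equiv track=rewrite | github.com/kidongnam1/sqm_3 | parsers/document_parser_modular/bl_mixin.py | _ordered_pages
-- ===== SOURCE A (Python) =====
-- from typing import Dict, List, Optional
--
-- def _ordered_pages(words: List[Dict]) -> List[int]:
--     pages = sorted({int(w.get("page", -1)) for w in words if int(w.get("page", -1)) >= 0})
--     preferred = [1, 2, 0]
--     out = [p for p in preferred if p in pages]
--     for p in pages:
--         if p not in out:
--             out.append(p)
--     return out
-- ===== SOURCE B (Python) =====
-- from typing import Dict, List
--
-- def _ordered_pages(words: List[Dict]) -> List[int]:
--     pages = {int(w.get("page", -1)) for w in words if int(w.get("page", -1)) >= 0}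
--     return sorted(pages, key=lambda p: (2, 0, 1)[p] if p < 3 else p)
-- ===== Notes on version B (the rewrite author's own statement) =====
-- stated objective: idiomatic
-- what changed: A's two-phase construction (build the preferred prefix [1,2,0]-filtered, then append each remaining page via a 'p not in out' membership scan) is replaced by a single keyed sort of the distinct page set: key p = (2,0,1)[p] for p < 3 (fixing the preferred order 1,2,0) and p itself otherwise.
import Mathlib
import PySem

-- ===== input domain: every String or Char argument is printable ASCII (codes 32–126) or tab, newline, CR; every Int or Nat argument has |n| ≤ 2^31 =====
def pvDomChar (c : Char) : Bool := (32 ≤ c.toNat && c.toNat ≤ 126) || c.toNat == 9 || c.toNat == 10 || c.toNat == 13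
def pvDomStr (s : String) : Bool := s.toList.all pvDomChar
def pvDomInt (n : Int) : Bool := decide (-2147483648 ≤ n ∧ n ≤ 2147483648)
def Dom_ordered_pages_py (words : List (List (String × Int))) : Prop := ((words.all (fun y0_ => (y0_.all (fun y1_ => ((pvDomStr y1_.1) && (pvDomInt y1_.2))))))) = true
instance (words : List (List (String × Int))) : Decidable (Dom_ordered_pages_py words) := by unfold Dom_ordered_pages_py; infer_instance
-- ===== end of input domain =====

-- B replaces A's preferred-prefix-then-append construction by one keyed sort of the page set (objective: idiomatic).

-- ===== PORT A =====
-- the distinct valid page set {int(w.get("page", -1)) for w in words if int(w.get("page", -1)) >= 0}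
def pvPageSet (words : List (List (String × Int))) : PySem.Set Int :=
  PySem.Set.ofList
    ((words.filter (fun w => decide (0 ≤ PySem.Dict.getD ⟨w⟩ "page" (-1)))).map
      (fun w => PySem.Dict.getD ⟨w⟩ "page" (-1)))

def ordered_pages_py (words : List (List (String × Int))) : List Int :=
  let pages := PySem.List.sorted (pvPageSet words) (fun p => p)
  let preferred : List Int := [1, 2, 0]
  let out := preferred.filter (fun p => decide (p ∈ pages))
  pages.foldl (fun out p => if p ∈ out then out else out ++ [p]) out

-- ===== PORT B =====
def ordered_pages_py_alt (words : List (List (String × Int))) : List Int :=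
  let pages := pvPageSet words
  PySem.List.sorted pages (fun p => if p < 3 then PySem.List.pyGetD [2, 0, 1] p 0 else p)

-- ===== PRECONDITION & SPEC =====
def Spec_ordered_pages_py (words : List (List (String × Int))) (out : List Int) : Prop := out = ordered_pages_py_alt words
instance (words : List (List (String × Int))) (out : List Int) : Decidable (Spec_ordered_pages_py words out) := by unfold Spec_ordered_pages_py; infer_instance

-- ===== CLAIM (what is proved, stated in full; the proofs are below) =====
def Claim_equal_ordered_pages_py : Prop := ∀ (words : List (List (String × Int))), Dom_ordered_pages_py words → Spec_ordered_pages_py words (ordered_pages_py words)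

-- ===== LEMMAS AND PROOFS =====

-- A's append loop over a duplicate-free list adds exactly the elements not already present.
theorem pv_foldl_append_notin (xs acc : List Int) (h : xs.Nodup) :
    xs.foldl (fun out p => if p ∈ out then out else out ++ [p]) acc
      = acc ++ xs.filter (fun p => decide (p ∉ acc)) := by
  induction xs generalizing acc with
  | nil => simp
  | cons p rest ih =>
    simp only [List.nodup_cons] at h
    simp only [List.foldl_cons, List.filter_cons]
    by_cases hp : p ∈ acc
    · rw [if_pos hp, ih acc h.2]; simp [hp]
    · rw [if_neg hp, ih (acc ++ [p]) h.2]
      have hfc : rest.filter (fun q => decide (q ∉ acc ++ [p])) = rest.filter (fun q => decide (q ∉ acc)) := by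
        apply List.filter_congr
        intro q hq
        have : q ≠ p := fun e => h.1 (e ▸ hq)
        simp [List.mem_append, this]
      rw [hfc, if_pos (by simpa using hp : decide (p ∉ acc) = true)]
      simp

theorem pv_key_ge_three (p : Int) (hp : 3 ≤ p) :
    (if p < 3 then PySem.List.pyGetD [2, 0, 1] p 0 else p) = p := by
  rw [if_neg (by omega)]

-- ===== VERDICT (by name: the statement is the Claim_ definition above) =====
theorem ordered_pages_py_spec : Claim_equal_ordered_pages_py := by
  intro words _
  unfold Spec_ordered_pages_py ordered_pages_py ordered_pages_py_alt
  set S := pvPageSet words with hS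
  set key : Int → Int := fun p => if p < 3 then PySem.List.pyGetD [2, 0, 1] p 0 else p with hkey
  set pages := PySem.List.sorted S (fun p => p) with hpages
  -- facts about pages
  have hperm : pages.Perm S := PySem.List.sorted_perm _ _ _
  have hSnodup : S.Nodup := PySem.Set.nodup_ofList _
  have hnodup : pages.Nodup := hperm.nodup_iff.mpr hSnodup
  have hpos : ∀ p ∈ pages, 0 ≤ p := by
    intro p hp
    have : p ∈ S := hperm.mem_iff.mp hp
    have : p ∈ ((words.filter (fun w => decide (0 ≤ PySem.Dict.getD ⟨w⟩ "page" (-1)))).map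
      (fun w => PySem.Dict.getD ⟨w⟩ "page" (-1))) := (PySem.Set.mem_ofList _ _).mp this
    obtain ⟨w, hw, rfl⟩ := List.mem_map.mp this
    have := List.of_mem_filter hw
    simpa using this
  have hsorted : pages.Pairwise (· < ·) := PySem.List.sorted_ofList_pairwise_lt _
  set pref : List Int := [1, 2, 0].filter (fun p => decide (p ∈ pages)) with hpref
  set rest : List Int := pages.filter (fun p => decide (p ∉ pref)) with hrest
  have hA : pages.foldl (fun out p => if p ∈ out then out else out ++ [p]) pref = pref ++ rest :=
    pv_foldl_append_notin pages pref hnodup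
  rw [hA]
  -- rest elements are ≥ 3
  have hrest_ge : ∀ p ∈ rest, 3 ≤ p := by
    intro p hp
    rw [hrest, List.mem_filter] at hp
    obtain ⟨hpg, hnp⟩ := hp
    simp only [decide_eq_true_eq] at hnp
    by_contra hlt
    push Not at hlt
    have h0 := hpos p hpg
    apply hnp
    rw [hpref, List.mem_filter]
    refine ⟨?_, by simpa using hpg⟩
    interval_cases p <;> simp
  -- the target equality via the sorted characterisation
  symm
  apply PySem.List.sorted_eq_of_perm_of_pairwise_lt
  · -- pref ++ rest is a permutation of S
    refine (List.perm_ext_iff_of_nodup ?_ hSnodup).mpr ?_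
    · rw [List.nodup_append]
      refine ⟨List.Nodup.filter _ (by decide), List.Nodup.filter _ hnodup, ?_⟩
      intro a ha b hb hab
      rw [hrest, List.mem_filter] at hb
      have hnp : b ∉ pref := by simpa using hb.2
      exact hnp (hab ▸ ha)
    · intro a
      rw [← hperm.mem_iff]
      constructor
      · intro h
        rcases List.mem_append.mp h with h | h
        · rw [hpref, List.mem_filter] at h; simpa using h.2
        · exact (List.mem_filter.mp h).1
      · intro h
        by_cases hin : a ∈ pref
        · exact List.mem_append.mpr (Or.inl hin)
        · exact List.mem_append.mpr (Or.inr (List.mem_filter.mpr ⟨h, by simpa using hin⟩))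
  · -- strictly increasing under key
    rw [List.pairwise_append]
    refine ⟨?_, ?_, ?_⟩
    · -- the preferred prefix: keys of 1, 2, 0 are 0, 1, 2
      have : ([1, 2, 0] : List Int).Pairwise (fun a b => key a < key b) := by
        rw [hkey]; decide
      exact this.filter _
    · -- rest: all ≥ 3, key is identity, pages strictly increasing
      have hpw : rest.Pairwise (· < ·) := hsorted.filter _
      refine hpw.imp_of_mem ?_
      intro a b ha hb hlt
      rw [hkey]
      simp only
      rw [pv_key_ge_three a (hrest_ge a ha), pv_key_ge_three b (hrest_ge b hb)]
      exact hlt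
    · -- cross: preferred keys ≤ 2, rest keys ≥ 3
      intro a ha b hb
      have hka : key a ≤ 2 := by
        rw [hpref, List.mem_filter] at ha
        have : a ∈ ([1, 2, 0] : List Int) := ha.1
        rw [hkey]
        fin_cases this <;> simp <;> decide
      have hkb : 3 ≤ key b := by
        rw [hkey]
        simp only
        rw [pv_key_ge_three b (hrest_ge b hb)]
        exact hrest_ge b hb
      omega
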